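-- pv_equiv track=rewrite | github.com/ali-m-dinani/reaxkit | src/reaxkit/workflows/ffield_workflow.py | _split_term_string
-- ===== SOURCE A (Python) =====
-- from typing import Dict, Iterable, List, Optional, Sequence, Tuple
--
-- def _split_term_string(term: str) -> List[str]:
--     """
--     Accepts: "C-H", "C H", "CCH", "1-2-3", "1 2 3"
--     Returns list of tokens (symbols or indices as strings).
--     """
--     t = term.strip()
--     if not t:
--         return []
--     # If it contains separators, split on them
--     for sep in ["-", ",", " ", "_"]:
--         if sep in t:
--             toks = [x for x in t.replace(",", " ").replace("-", " ").replace("_", " ").split() if x]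
--             return toks
--
--     # No separators: could be "CCH" or "1123" (indices without separators).
--     # Heuristic: if all digits => treat as single token (ambiguous) -> user should use separators.
--     if t.isdigit():
--         return [t]
--
--     # For symbols like CCH, split into element-like tokens (handles 1-2 letter symbols).
--     # Example: "SiOH" -> ["Si","O","H"]
--     toks: List[str] = []
--     i = 0
--     while i < len(t):
--         ch = t[i]
--         if ch.isupper():
--             if i + 1 < len(t) and t[i + 1].islower():
--                 toks.append(t[i : i + 2])
--                 i += 2
--             else:
--                 toks.append(ch)
--                 i += 1
--         else:
--             # unexpected; fall back
--             toks.append(ch)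
--             i += 1
--     return toks
-- ===== SOURCE B (Python) =====
-- from typing import List
--
-- def _split_term_string(term: str) -> List[str]:
--     t = term.strip()
--     if not t:
--         return []
--     # Separator branch: one grouping pass instead of replace+replace+replace+split.
--     if any(c in ",- _" for c in t):
--         toks: List[str] = []
--         cur = ""
--         for c in t:
--             if c in ",-_" or c.isspace():
--                 if cur:
--                     toks.append(cur)
--                     cur = ""
--             else:
--                 cur += c
--         if cur:
--             toks.append(cur)
--         return toks
--     if t.isdigit():
--         return [t]
--     # Element branch: single pass merging a lowercase into a preceding single uppercase token.
--     toks = []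
--     for c in t:
--         if c.islower() and toks and len(toks[-1]) == 1 and toks[-1].isupper():
--             toks[-1] += c
--         else:
--             toks.append(c)
--     return toks
-- ===== Notes on version B (the rewrite author's own statement) =====
-- stated objective: alternative
-- what changed: The triple replace+split separator branch becomes a single grouping pass with a current-token accumulator, and the index-walking element loop (peeking at t[i+1] and slicing t[i:i+2]) becomes a single per-character pass that merges a lowercase letter into a preceding single-uppercase token.
import Mathlib
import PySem

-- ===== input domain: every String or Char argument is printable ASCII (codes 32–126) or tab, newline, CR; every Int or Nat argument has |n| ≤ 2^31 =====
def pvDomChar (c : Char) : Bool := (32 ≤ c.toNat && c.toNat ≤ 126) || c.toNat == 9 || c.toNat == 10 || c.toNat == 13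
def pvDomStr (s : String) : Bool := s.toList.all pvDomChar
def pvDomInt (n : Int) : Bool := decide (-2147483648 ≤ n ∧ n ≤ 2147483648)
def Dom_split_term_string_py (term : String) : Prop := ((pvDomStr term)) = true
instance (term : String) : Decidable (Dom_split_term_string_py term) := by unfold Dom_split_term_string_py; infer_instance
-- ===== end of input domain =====

-- B replaces A's triple replace+split and its index-walking element loop by two single
-- grouping/merging passes over the characters (objective: alternative, same cost).

-- ===== PORT A =====
-- A's separator branch: t.replace(",", " ").replace("-", " ").replace("_", " ").split(), empties filtered
def pvSepSplitA (t : List Char) : List (List Char) :=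
  (PySem.Chars.split₀
      (PySem.Chars.replace (PySem.Chars.replace (PySem.Chars.replace t [','] [' ']) ['-'] [' ']) ['_'] [' '])).filter
    (fun x => !x.isEmpty)

-- A's element loop: while i < len(t), pairing an uppercase with a following lowercase via indices
def pvATok (t : List Char) (i : Nat) (toks : List (List Char)) : List (List Char) :=
  if h : i < t.length then
    if PySem.Chars.isupper t[i] then
      if h2 : i + 1 < t.length then
        if PySem.Chars.islower t[i + 1] then
          pvATok t (i + 2) (toks ++ [PySem.List.slice t (some (i : Int)) (some ((i : Int) + 2))])
        else pvATok t (i + 1) (toks ++ [[t[i]]])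
      else pvATok t (i + 1) (toks ++ [[t[i]]])
    else pvATok t (i + 1) (toks ++ [[t[i]]])
  else toks
termination_by t.length - i

def split_term_string_py (term : String) : List String :=
  let t := PySem.Chars.strip term.toList
  if t.isEmpty then []
  else if PySem.Chars.isIn ['-'] t then (pvSepSplitA t).map String.ofList
  else if PySem.Chars.isIn [','] t then (pvSepSplitA t).map String.ofList
  else if PySem.Chars.isIn [' '] t then (pvSepSplitA t).map String.ofList
  else if PySem.Chars.isIn ['_'] t then (pvSepSplitA t).map String.ofList
  else if PySem.Chars.strIsdigit t then [String.ofList t]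
  else (pvATok t 0 []).map String.ofList

-- ===== PORT B =====
-- B's separator branch: one grouping pass (cur accumulates a token, flushed at delimiters)
def pvBSplit : List Char → List (List Char) → List Char → List (List Char)
  | [], toks, cur => if cur.isEmpty then toks else toks ++ [cur]
  | c :: rest, toks, cur =>
    if PySem.Chars.isIn [c] [',', '-', '_'] || PySem.Chars.isspace c then
      if cur.isEmpty then pvBSplit rest toks [] else pvBSplit rest (toks ++ [cur]) []
    else pvBSplit rest toks (cur ++ [c])

-- B's element loop: merge a lowercase into a preceding single-uppercase token
def pvLastSingleUpper (toks : List (List Char)) : Bool :=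
  match toks.getLast? with
  | some [u] => PySem.Chars.isupper u
  | _ => false

def pvBTok : List Char → List (List Char) → List (List Char)
  | [], toks => toks
  | c :: rest, toks =>
    if PySem.Chars.islower c && pvLastSingleUpper toks then
      pvBTok rest (toks.dropLast ++ [(toks.getLast?.getD []) ++ [c]])
    else pvBTok rest (toks ++ [[c]])

def split_term_string_py_alt (term : String) : List String :=
  let t := PySem.Chars.strip term.toList
  if t.isEmpty then []
  else if t.any (fun c => PySem.Chars.isIn [c] [',', '-', ' ', '_']) then
    (pvBSplit t [] []).map String.ofList
  else if PySem.Chars.strIsdigit t then [String.ofList t]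
  else (pvBTok t []).map String.ofList

-- ===== PRECONDITION & SPEC =====
def Spec_split_term_string_py (term : String) (out : List String) : Prop := out = split_term_string_py_alt term
instance (term : String) (out : List String) : Decidable (Spec_split_term_string_py term out) := by unfold Spec_split_term_string_py; infer_instance

-- ===== CLAIM (what is proved, stated in full; the proofs are below) =====
def Claim_equal_split_term_string_py : Prop := ∀ (term : String), Dom_split_term_string_py term → Spec_split_term_string_py term (split_term_string_py term)

-- ===== LEMMAS AND PROOFS =====

-- the delimiter map performed by A's three replaces
def pvG (c : Char) : Char := if c = ',' ∨ c = '-' ∨ c = '_' then ' ' else c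

-- mid-level description of the element tokenization shared by both element loops
def pvFSpec : List Char → List (List Char)
  | [] => []
  | [c] => [[c]]
  | c :: d :: rest =>
    if PySem.Chars.isupper c && PySem.Chars.islower d then [c, d] :: pvFSpec rest
    else [c] :: pvFSpec (d :: rest)

theorem pv_isIn_singleton (c : Char) (l : List Char) : PySem.Chars.isIn [c] l = l.contains c := by
  by_cases h : c ∈ l
  · simp [(PySem.Chars.isIn_iff_infix _ _).mpr ((List.singleton_infix_iff c l).mpr h), h]
  · have : ¬ ([c] <:+: l) := fun hh => h ((List.singleton_infix_iff c l).mp hh)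
    simp [(PySem.Chars.isIn_eq_false_iff _ _).mpr this, h]

theorem pv_replace_go (o n : Char) : ∀ (fuel : Nat) (l acc : List Char), l.length ≤ fuel →
    PySem.Chars.replace.go [o] [n] fuel l acc = acc.reverse ++ l.map (fun c => if c = o then n else c)
  | 0, l, acc, h => by
    have : l = [] := by cases l <;> simp_all
    subst this; simp [PySem.Chars.replace.go]
  | fuel + 1, [], acc, h => by simp [PySem.Chars.replace.go]
  | fuel + 1, c :: t, acc, h => by
    have ht : t.length ≤ fuel := by simpa using Nat.le_of_succ_le_succ h
    rw [PySem.Chars.replace.go]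
    by_cases hc : c = o
    · have hp : List.isPrefixOf [o] (c :: t) = true := by simp [List.isPrefixOf, hc]
      rw [if_pos hp, pv_replace_go o n fuel _ _ (by simpa using ht)]
      simp [hc]
    · have hp : List.isPrefixOf [o] (c :: t) = false := by
        simp [List.isPrefixOf]; exact fun hh => hc hh.symm
      rw [if_neg (by simp [hp]), pv_replace_go o n fuel _ _ ht]
      simp [hc]

theorem pv_replace_single (o n : Char) (s : List Char) :
    PySem.Chars.replace s [o] [n] = s.map (fun c => if c = o then n else c) := by
  rw [PySem.Chars.replace]
  rw [if_neg (by simp)]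
  exact pv_replace_go o n s.length s [] (le_refl _)

theorem pv_isspace_g (c : Char) :
    PySem.Chars.isspace (pvG c) = (PySem.Chars.isIn [c] [',', '-', '_'] || PySem.Chars.isspace c) := by
  rw [pv_isIn_singleton]
  by_cases h : c = ',' ∨ c = '-' ∨ c = '_'
  · have hg : pvG c = ' ' := by simp [pvG, h]
    rw [hg]; rcases h with h | h | h <;> subst h <;> decide
  · have hg : pvG c = c := by simp [pvG, h]
    push Not at h
    have hc : List.contains [',', '-', '_'] c = false := by
      rw [List.contains_eq_mem]
      simp only [decide_eq_false_iff_not, List.mem_cons, List.not_mem_nil]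
      rintro (e | e | e | e) <;> simp_all
    rw [hg, hc]; simp

theorem pv_g_id (c : Char) (h : (PySem.Chars.isIn [c] [',', '-', '_'] || PySem.Chars.isspace c) = false) :
    pvG c = c := by
  rw [pv_isIn_singleton] at h
  simp only [Bool.or_eq_false_iff] at h
  have hm := h.1
  rw [List.contains_eq_mem] at hm
  simp only [decide_eq_false_iff_not, List.mem_cons, List.not_mem_nil] at hm
  simp only [pvG, ite_eq_right_iff]
  intro e; exact absurd (by rcases e with e | e | e <;> simp [e]) hm

theorem pv_split_go : ∀ (s cur : List Char) (acc : List (List Char)),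
    PySem.Chars.split₀.go (s.map pvG) cur acc = pvBSplit s acc.reverse cur.reverse
  | [], cur, acc => by
    by_cases h : cur = [] <;> simp [PySem.Chars.split₀.go, pvBSplit, h]
  | c :: rest, cur, acc => by
    simp only [List.map_cons]
    rw [PySem.Chars.split₀.go]
    by_cases hd : (PySem.Chars.isIn [c] [',', '-', '_'] || PySem.Chars.isspace c) = true
    · rw [if_pos (by rw [pv_isspace_g]; exact hd)]
      by_cases hc : cur = []
      · subst hc
        rw [if_pos (by simp), pv_split_go rest [] acc]
        simp [pvBSplit, hd]
      · rw [if_neg (by simpa using hc), pv_split_go rest [] (cur.reverse :: acc)]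
        simp [pvBSplit, hd, hc]
    · have hd' := Bool.eq_false_iff.mpr hd
      rw [if_neg (by rw [pv_isspace_g]; simp [hd']), pv_g_id c hd', pv_split_go rest (c :: cur) acc]
      simp [pvBSplit, hd']

theorem pv_bsplit_nonempty : ∀ (s : List Char) (toks : List (List Char)) (cur : List Char),
    (∀ x ∈ toks, x.isEmpty = false) → ∀ x ∈ pvBSplit s toks cur, x.isEmpty = false
  | [], toks, cur, h => by
    by_cases hc : cur = []
    · simp_all [pvBSplit]
    · rw [pvBSplit, if_neg (by simpa using hc)]
      intro x hx
      rcases List.mem_append.mp hx with hx | hx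
      · exact h x hx
      · simp_all
  | c :: rest, toks, cur, h => by
    rw [pvBSplit]
    split
    · by_cases hc : cur = []
      · rw [if_pos (by simp [hc])]
        exact pv_bsplit_nonempty rest toks [] h
      · rw [if_neg (by simpa using hc)]
        refine pv_bsplit_nonempty rest _ [] ?_
        intro x hx
        rcases List.mem_append.mp hx with hx | hx
        · exact h x hx
        · simp_all
    · exact pv_bsplit_nonempty rest toks (cur ++ [c]) h

theorem pv_slice_two (l : List Char) (i : Nat) (h : i + 1 < l.length) :
    PySem.List.slice l (some (i : Int)) (some ((i : Int) + 2)) = [l[i], l[i + 1]] := by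
  have hcast : ((i : Int) + 2) = ((i + 2 : Nat) : Int) := by push_cast; ring
  rw [hcast, PySem.List.slice_natCast]
  have h2 : i + 2 - i = 2 := by omega
  have h3 : List.drop i l = l[i] :: l[i + 1] :: List.drop (i + 2) l := by
    rw [List.drop_eq_getElem_cons (show i < l.length by omega)]
    congr 1
    exact List.drop_eq_getElem_cons (show i + 1 < l.length by omega)
  rw [h2, h3]
  rfl

theorem pv_atok_eq (t : List Char) : ∀ (i : Nat) (toks : List (List Char)),
    pvATok t i toks = toks ++ pvFSpec (t.drop i) := by
  intro i
  induction hn : t.length - i using Nat.strong_induction_on generalizing i with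
  | _ n ih =>
  intro toks
  rw [pvATok]
  by_cases h : i < t.length
  · rw [dif_pos h]
    have hdrop : t.drop i = t[i] :: t.drop (i + 1) := List.drop_eq_getElem_cons h
    by_cases hu : PySem.Chars.isupper t[i] = true
    · rw [if_pos hu]
      by_cases h2 : i + 1 < t.length
      · rw [dif_pos h2]
        have hdrop2 : t.drop (i + 1) = t[i + 1] :: t.drop (i + 2) := List.drop_eq_getElem_cons h2
        by_cases hl : PySem.Chars.islower t[i + 1] = true
        · rw [if_pos hl, pv_slice_two t i h2]
          rw [ih (t.length - (i + 2)) (by omega) (i + 2) rfl]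
          rw [hdrop, hdrop2]
          simp [pvFSpec, hu, hl]
        · rw [if_neg hl, ih (t.length - (i + 1)) (by omega) (i + 1) rfl]
          rw [hdrop, hdrop2]
          simp [pvFSpec, hu, hl]
      · rw [dif_neg h2]
        have : t.drop (i + 1) = [] := List.drop_eq_nil_of_le (by omega)
        rw [ih (t.length - (i + 1)) (by omega) (i + 1) rfl, hdrop, this]
        simp [pvFSpec]
    · rw [if_neg hu, ih (t.length - (i + 1)) (by omega) (i + 1) rfl, hdrop]
      rcases hd2 : t.drop (i + 1) with _ | ⟨d, rest⟩
      · simp [pvFSpec]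
      · simp [pvFSpec, hu]
  · rw [dif_neg h]
    have : t.drop i = [] := List.drop_eq_nil_of_le (by omega)
    simp [this, pvFSpec]

theorem pv_btok_eq : ∀ (cs : List Char) (toks : List (List Char)),
    (∀ c rest, cs = c :: rest → (PySem.Chars.islower c && pvLastSingleUpper toks) = false) →
    pvBTok cs toks = toks ++ pvFSpec cs
  | [], toks, h => by simp [pvBTok, pvFSpec]
  | [c], toks, h => by
    rw [pvBTok, if_neg (by simp [h c [] rfl]), pvBTok]
    simp [pvFSpec]
  | c :: d :: rest, toks, h => by
    rw [pvBTok, if_neg (by simp [h c _ rfl])]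
    by_cases hp : PySem.Chars.isupper c = true ∧ PySem.Chars.islower d = true
    · rw [pvBTok]
      have hls : pvLastSingleUpper (toks ++ [[c]]) = true := by
        simp [pvLastSingleUpper, hp.1]
      rw [if_pos (by simp [hp.2, hls])]
      have hdrop : (toks ++ [[c]]).dropLast = toks := by simp
      have hlast : (toks ++ [[c]]).getLast?.getD [] = [c] := by simp
      rw [hdrop, hlast]
      simp only [List.singleton_append]
      rw [pv_btok_eq rest (toks ++ [[c, d]]) (by
        intro c' rest' he
        have hne : pvLastSingleUpper (toks ++ [[c, d]]) = false := by
          simp [pvLastSingleUpper]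
        simp [hne])]
      simp [pvFSpec, hp.1, hp.2]
    · have hcond : (PySem.Chars.islower d && pvLastSingleUpper (toks ++ [[c]])) = false := by
        have hl : pvLastSingleUpper (toks ++ [[c]]) = PySem.Chars.isupper c := by
          simp [pvLastSingleUpper]
        rw [hl]
        by_cases h1 : PySem.Chars.islower d = true
        · by_cases h2 : PySem.Chars.isupper c = true
          · exact absurd ⟨h2, h1⟩ hp
          · simp [Bool.eq_false_iff.mpr h2]
        · simp [Bool.eq_false_iff.mpr h1]
      rw [pv_btok_eq (d :: rest) (toks ++ [[c]]) (by intro c' rest' he; cases he; exact hcond)]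
      have hf : pvFSpec (c :: d :: rest) = [c] :: pvFSpec (d :: rest) := by
        rw [pvFSpec, if_neg (by rw [Bool.and_eq_true]; exact hp)]
      rw [hf]
      simp

theorem pv_detect (t : List Char) :
    (PySem.Chars.isIn ['-'] t || PySem.Chars.isIn [','] t || PySem.Chars.isIn [' '] t || PySem.Chars.isIn ['_'] t)
      = t.any (fun c => PySem.Chars.isIn [c] [',', '-', ' ', '_']) := by
  simp only [pv_isIn_singleton, List.contains_eq_mem]
  rw [Bool.eq_iff_iff]
  simp only [Bool.or_eq_true, decide_eq_true_eq, List.any_eq_true, List.mem_cons,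
    List.not_mem_nil, or_false]
  constructor
  · rintro (((h | h) | h) | h) <;> exact ⟨_, h, by simp⟩
  · rintro ⟨c, hc, h⟩
    rcases h with rfl | rfl | rfl | rfl <;> tauto

theorem pv_sep_branch (t : List Char) : pvSepSplitA t = pvBSplit t [] [] := by
  have hmap : PySem.Chars.replace
      (PySem.Chars.replace (PySem.Chars.replace t [','] [' ']) ['-'] [' ']) ['_'] [' '] = t.map pvG := by
    rw [pv_replace_single, pv_replace_single, pv_replace_single, List.map_map, List.map_map]
    apply List.map_congr_left
    intro c _
    simp only [Function.comp, pvG]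
    by_cases h1 : c = ',' <;> by_cases h2 : c = '-' <;> by_cases h3 : c = '_' <;>
      simp_all
  rw [pvSepSplitA, hmap, PySem.Chars.split₀, pv_split_go t [] []]
  simp only [List.reverse_nil]
  apply List.filter_eq_self.mpr
  intro x hx
  have := pv_bsplit_nonempty t [] [] (by simp) x hx
  simp [this]

-- ===== VERDICT (by name: the statement is the Claim_ definition above) =====
theorem split_term_string_py_spec : Claim_equal_split_term_string_py := by
  intro term _
  unfold Spec_split_term_string_py
  simp only [split_term_string_py, split_term_string_py_alt]
  set t := PySem.Chars.strip term.toList with ht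
  by_cases h0 : t.isEmpty = true
  · simp [h0]
  · rw [if_neg h0, if_neg h0]
    by_cases h1 : PySem.Chars.isIn ['-'] t = true
    · have hany : t.any (fun c => PySem.Chars.isIn [c] [',', '-', ' ', '_']) = true := by
        rw [← pv_detect]; simp [h1]
      rw [if_pos h1, if_pos hany, pv_sep_branch]
    · rw [if_neg h1]
      by_cases h2 : PySem.Chars.isIn [','] t = true
      · have hany : t.any (fun c => PySem.Chars.isIn [c] [',', '-', ' ', '_']) = true := by
          rw [← pv_detect]; simp [h2]
        rw [if_pos h2, if_pos hany, pv_sep_branch]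
      · rw [if_neg h2]
        by_cases h3 : PySem.Chars.isIn [' '] t = true
        · have hany : t.any (fun c => PySem.Chars.isIn [c] [',', '-', ' ', '_']) = true := by
            rw [← pv_detect]; simp [h3]
          rw [if_pos h3, if_pos hany, pv_sep_branch]
        · rw [if_neg h3]
          by_cases h4 : PySem.Chars.isIn ['_'] t = true
          · have hany : t.any (fun c => PySem.Chars.isIn [c] [',', '-', ' ', '_']) = true := by
              rw [← pv_detect]; simp [h4]
            rw [if_pos h4, if_pos hany, pv_sep_branch]
          · have hany : t.any (fun c => PySem.Chars.isIn [c] [',', '-', ' ', '_']) = false := by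
              rw [← pv_detect]
              simp [Bool.eq_false_iff.mpr h1, Bool.eq_false_iff.mpr h2,
                Bool.eq_false_iff.mpr h3, Bool.eq_false_iff.mpr h4]
            rw [if_neg h4]
            by_cases hdig : PySem.Chars.strIsdigit t = true
            · rw [if_pos hdig, if_neg (by simp [hany]), if_pos hdig]
            · rw [if_neg hdig, if_neg (by simp [hany]), if_neg hdig]
              have htok : pvATok t 0 [] = pvBTok t [] := by
                rw [pv_atok_eq t 0 [],
                  pv_btok_eq t [] (by intro c rest he; simp [pvLastSingleUpper])]
                simp
              rw [htok]
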